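-- pv_equiv track=rewrite | github.com/GanaviDGowda/IRIS-Bot-Institutional-Research-Information-System | app/utils/issn_validator.py | _validate_issn_format
-- ===== SOURCE A (Python) =====
-- def _validate_issn_format(issn: str) -> bool:
--     """
--     Validate ISSN format and checksum.
--
--     Args:
--         issn: ISSN string (e.g., "1234-5678")
--
--     Returns:
--         True if valid ISSN format
--     """
--     # Remove hyphen for validation
--     issn_digits = issn.replace('-', '').replace('-', '')
--
--     if len(issn_digits) != 8:
--         return False
--
--     # Calculate checksum
--     try:
--         total = 0
--         for i in range(7):
--             digit = int(issn_digits[i])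
--             total += digit * (8 - i)
--
--         checksum = issn_digits[7]
--         if checksum.upper() == 'X':
--             checksum_value = 10
--         else:
--             checksum_value = int(checksum)
--
--         # Check if valid
--         remainder = total % 11
--         expected = (11 - remainder) % 11
--         if expected == 10:
--             expected = 'X'
--         else:
--             expected = str(expected)
--
--         return str(checksum_value) == str(expected) or checksum.upper() == expected
--
--     except ValueError:
--         return False
-- ===== SOURCE B (Python) =====
-- def _validate_issn_format(issn: str) -> bool:
--     digits = issn.replace('-', '')
--     if len(digits) != 8:
--         return False
--     total = 0
--     for i, ch in enumerate(digits):
--         if i == 7 and ch in 'Xx':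
--             value = 10
--         elif ch.isdigit():
--             value = ord(ch) - ord('0')
--         else:
--             return False
--         total += value * (8 - i)
--     return total % 11 == 0
-- ===== Notes on version B (the rewrite author's own statement) =====
-- stated objective: simpler
-- what changed: One pass folds the check digit into a single weighted sum (weight 1 for position 7, X/x counted as 10) and tests total % 11 == 0, removing A's expected-check-digit computation and its string comparison; non-digits short-circuit with an early return instead of a try/except.
import Mathlib
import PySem

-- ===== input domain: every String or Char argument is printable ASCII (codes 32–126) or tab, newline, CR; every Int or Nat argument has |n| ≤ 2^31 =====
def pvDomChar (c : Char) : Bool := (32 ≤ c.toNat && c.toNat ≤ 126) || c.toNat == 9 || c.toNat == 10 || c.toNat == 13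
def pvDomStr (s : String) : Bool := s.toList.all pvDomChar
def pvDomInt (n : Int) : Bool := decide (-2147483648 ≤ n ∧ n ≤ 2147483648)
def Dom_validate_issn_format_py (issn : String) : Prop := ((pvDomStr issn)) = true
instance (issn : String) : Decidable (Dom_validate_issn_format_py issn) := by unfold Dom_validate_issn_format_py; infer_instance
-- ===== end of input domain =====

-- B replaces A's expected-check-digit computation and string comparison by a single
-- weighted sum over all 8 characters (X/x as 10 at position 7) tested mod 11; objective: simpler.


-- ===== PORT A =====
-- one iteration of A's `for i in range(7)` loop; `none` = a ValueError was raised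
def aDigitStep (s : List Char) (acc : Option Int) (i : Int) : Option Int :=
  match acc with
  | none => none
  | some total =>
    match PySem.List.pyGet? s i with
    | none => none
    | some c =>
      match PySem.Int.ofChars? [c] with
      | none => none
      | some digit => some (total + digit * (8 - i))

-- A's `expected` string: (11 - total % 11) % 11, rendered 'X' for 10
def aExpected (total : Int) : List Char :=
  let remainder := PySem.Int.mod total 11
  let expected := PySem.Int.mod (11 - remainder) 11
  if expected = 10 then ['X'] else PySem.Int.toChars expected

def validate_issn_format_py (issn : String) : Bool :=
  let issn_digits := PySem.Chars.replace (PySem.Chars.replace issn.toList ['-'] []) ['-'] []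
  if issn_digits.length ≠ 8 then false
  else
    match (PySem.List.pyRange 0 7 1).foldl (aDigitStep issn_digits) (some 0) with
    | none => false          -- `except ValueError: return False`
    | some total =>
      match PySem.List.pyGet? issn_digits 7 with
      | none => false        -- unreachable: the length-8 guard passed
      | some checksum =>
        match (if PySem.Chars.upper [checksum] = ['X'] then some (10 : Int)
               else PySem.Int.ofChars? [checksum]) with
        | none => false      -- `except ValueError: return False`
        | some checksum_value =>
          (PySem.Int.toChars checksum_value == aExpected total)
            || (PySem.Chars.upper [checksum] == aExpected total)

-- ===== PORT B =====
-- B's single loop over `enumerate(digits)`; early `return False` on a bad character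
def bGo : List (Int × Char) → Int → Bool
  | [], total => PySem.Int.mod total 11 == 0
  | (i, ch) :: rest, total =>
    if i == 7 && PySem.Chars.isIn [ch] ['X', 'x'] then
      bGo rest (total + 10 * (8 - i))
    else if PySem.Chars.isdigit ch then
      bGo rest (total + ((ch.toNat : Int) - 48) * (8 - i))
    else false

def validate_issn_format_py_alt (issn : String) : Bool :=
  let digits := PySem.Chars.replace issn.toList ['-'] []
  if digits.length ≠ 8 then false
  else bGo (PySem.List.enumerate digits 0) 0

-- ===== PRECONDITION & SPEC =====
def Spec_validate_issn_format_py (issn : String) (out : Bool) : Prop := out = validate_issn_format_py_alt issn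
instance (issn : String) (out : Bool) : Decidable (Spec_validate_issn_format_py issn out) := by unfold Spec_validate_issn_format_py; infer_instance

-- ===== CLAIM (what is proved, stated in full; the proofs are below) =====
def Claim_equal_validate_issn_format_py : Prop := ∀ (issn : String), Dom_validate_issn_format_py issn → Spec_validate_issn_format_py issn (validate_issn_format_py issn)

-- ===== LEMMAS AND PROOFS =====

-- removing '-' is List.filter
theorem replace_go_dash (fuel : Nat) (l acc : List Char) (h : l.length ≤ fuel) :
    PySem.Chars.replace.go ['-'] [] fuel l acc = acc.reverse ++ l.filter (· ≠ '-') := by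
  induction fuel generalizing l acc with
  | zero =>
    cases l with
    | nil => simp [PySem.Chars.replace.go]
    | cons c t => simp at h
  | succ n ih =>
    cases l with
    | nil => simp [PySem.Chars.replace.go]
    | cons c t =>
      simp only [PySem.Chars.replace.go, List.isPrefixOf]
      by_cases hc : c = '-'
      · subst hc
        rw [if_pos (by simp)]
        rw [show List.drop (['-'] : List Char).length ('-' :: t) = t from rfl,
          show ([] : List Char).reverse ++ acc = acc from by simp]
        rw [ih t acc (by simp at h; omega)]
        simp
      · have hb : (('-' == c) && List.isPrefixOf [] t) = false := by
          simp [Ne.symm hc]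
        rw [if_neg (by simp [Ne.symm hc])]
        rw [ih t (c :: acc) (by simp at h; omega)]
        simp [hc]

theorem replace_dash (l : List Char) :
    PySem.Chars.replace l ['-'] [] = l.filter (· ≠ '-') := by
  rw [PySem.Chars.replace]
  simp [replace_go_dash l.length l [] (le_refl _)]

-- int(c) for a single ASCII character: its digit value, ValueError otherwise
theorem ofChars_single (c : Char) (h : c.toNat ≤ 126) :
    PySem.Int.ofChars? [c]
      = if PySem.Chars.isdigit c then some ((c.toNat : Int) - 48) else none := by
  have hc : c = Char.ofNat c.toNat := (Char.ofNat_toNat c).symm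
  rw [hc]
  generalize c.toNat = n at h ⊢
  interval_cases n <;> decide

-- c.upper() == 'X' for an ASCII character
theorem upper_single_X (c : Char) (h : c.toNat ≤ 126) :
    (PySem.Chars.upper [c] = ['X']) ↔ (c = 'X' ∨ c = 'x') := by
  have hc : c = Char.ofNat c.toNat := (Char.ofNat_toNat c).symm
  rw [hc]
  generalize c.toNat = n at h ⊢
  interval_cases n <;> decide

-- c in 'Xx'
theorem isIn_Xx (c : Char) : PySem.Chars.isIn [c] ['X', 'x'] = (c == 'X' || c == 'x') := by
  by_cases h1 : c = 'X'
  · subst h1; decide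
  · by_cases h2 : c = 'x'
    · subst h2; decide
    · have h : ¬ ([c] <:+: (['X', 'x'] : List Char)) := by
        intro h
        have := h.mem (List.mem_singleton.2 rfl)
        simp at this
        tauto
      rw [(PySem.Chars.isIn_eq_false_iff _ _).2 h]
      simp [h1, h2]

theorem toChars_ne_X (d : Int) (h0 : 0 ≤ d) (h9 : d ≤ 10) : PySem.Int.toChars d ≠ ['X'] := by
  interval_cases d <;> decide

theorem toChars_inj (a b : Int) (ha0 : 0 ≤ a) (ha : a ≤ 10) (hb0 : 0 ≤ b) (hb : b ≤ 10) :
    (PySem.Int.toChars a = PySem.Int.toChars b) ↔ a = b := by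
  interval_cases a <;> interval_cases b <;> decide

-- digit char facts
theorem digit_char_upper (c : Char) (h : c.toNat ≤ 126) (hd : PySem.Chars.isdigit c = true) :
    PySem.Chars.upper [c] = [c] := by
  have hc : c = Char.ofNat c.toNat := (Char.ofNat_toNat c).symm
  rw [hc] at hd ⊢
  generalize c.toNat = n at h hd ⊢
  interval_cases n <;> first | rfl | (exfalso; revert hd; decide)

theorem digit_char_toChars (c : Char) (h : c.toNat ≤ 126) (hd : PySem.Chars.isdigit c = true) :
    PySem.Int.toChars ((c.toNat : Int) - 48) = [c] := by
  have hc : c = Char.ofNat c.toNat := (Char.ofNat_toNat c).symm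
  rw [hc] at hd ⊢
  generalize c.toNat = n at h hd ⊢
  interval_cases n <;> first | decide | (exfalso; revert hd; decide)

theorem isdigit_bounds (c : Char) (h : PySem.Chars.isdigit c = true) :
    48 ≤ c.toNat ∧ c.toNat ≤ 57 := by
  simp only [PySem.Chars.isdigit, Bool.and_eq_true, decide_eq_true_eq] at h
  exact ⟨Fin.mk_le_mk.mp h.1, Fin.mk_le_mk.mp h.2⟩

-- final comparison, digit check character: A's string test equals B's mod-11 test
theorem final_digit (t d : Int) (h0 : 0 ≤ d) (h9 : d ≤ 9) :
    ((PySem.Int.toChars d == aExpected t) || (PySem.Int.toChars d == aExpected t))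
      = ((t + d) % 11 == 0) := by
  rw [Bool.or_self]
  simp only [aExpected, PySem.Int.mod_eq_emod_of_pos (show (0:Int) < 11 by norm_num)]
  set e := (11 - t % 11) % 11 with he
  have he0 : 0 ≤ e := Int.emod_nonneg _ (by norm_num)
  have he10 : e < 11 := Int.emod_lt_of_pos _ (by norm_num)
  by_cases hx : e = 10
  · rw [if_pos hx]
    have h1 : (PySem.Int.toChars d == (['X'] : List Char)) = false := by
      simp [toChars_ne_X d h0 (by omega)]
    rw [h1, Bool.eq_iff_iff]
    simp only [beq_iff_eq, Bool.false_eq_true, false_iff]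
    omega
  · rw [if_neg hx]
    have h1 : (PySem.Int.toChars d == PySem.Int.toChars e) = decide (d = e) := by
      by_cases h : d = e
      · simp [h]
      · simp [h, (toChars_inj d e h0 (by omega) he0 (by omega)).not.2 h]
    rw [h1, Bool.eq_iff_iff]
    simp only [decide_eq_true_eq, beq_iff_eq]
    omega

-- final comparison, X/x check character
theorem final_X (t : Int) :
    ((PySem.Int.toChars 10 == aExpected t) || ((['X'] : List Char) == aExpected t))
      = ((t + 10) % 11 == 0) := by
  simp only [aExpected, PySem.Int.mod_eq_emod_of_pos (show (0:Int) < 11 by norm_num)]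
  set e := (11 - t % 11) % 11 with he
  have he0 : 0 ≤ e := Int.emod_nonneg _ (by norm_num)
  have he10 : e < 11 := Int.emod_lt_of_pos _ (by norm_num)
  by_cases hx : e = 10
  · rw [if_pos hx, Bool.eq_iff_iff]
    simp only [Bool.or_eq_true, beq_iff_eq, beq_self_eq_true, or_true, true_iff]
    omega
  · rw [if_neg hx]
    have h1 : (PySem.Int.toChars 10 == PySem.Int.toChars e) = false := by
      simp only [beq_eq_false_iff_ne, ne_eq]
      rw [toChars_inj 10 e (by norm_num) (by norm_num) he0 (by omega)]
      omega
    have h2 : ((['X'] : List Char) == PySem.Int.toChars e) = false := by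
      simp only [beq_eq_false_iff_ne, ne_eq]
      intro h
      exact toChars_ne_X e he0 (by omega) h.symm
    rw [h1, h2, Bool.eq_iff_iff]
    simp only [Bool.or_self, Bool.false_eq_true, beq_iff_eq, false_iff]
    omega

-- ===== VERDICT (by name: the statement is the Claim_ definition above) =====
theorem validate_issn_format_py_spec : Claim_equal_validate_issn_format_py := by
  intro issn hdom
  unfold Spec_validate_issn_format_py validate_issn_format_py validate_issn_format_py_alt
  simp only [replace_dash, List.filter_filter, Bool.and_self]
  have hall : ∀ c ∈ issn.toList.filter (fun x => decide (x ≠ '-')), c.toNat ≤ 126 := by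
    intro c hc
    have hmem := List.mem_of_mem_filter hc
    have := List.all_eq_true.1 hdom c hmem
    simp only [pvDomChar, Bool.or_eq_true, Bool.and_eq_true, decide_eq_true_eq, beq_iff_eq] at this
    omega
  generalize issn.toList.filter (fun x => decide (x ≠ '-')) = t at hall
  by_cases hlen : t.length = 8
  case neg =>
    rw [if_pos (by omega), if_pos (by omega)]
  case pos =>
    rw [if_neg (by omega), if_neg (by omega)]
    match t, hlen with
    | [c0, c1, c2, c3, c4, c5, c6, c7], _ =>
      have h0 : c0.toNat ≤ 126 := hall c0 (by simp)
      have h1 : c1.toNat ≤ 126 := hall c1 (by simp)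
      have h2 : c2.toNat ≤ 126 := hall c2 (by simp)
      have h3 : c3.toNat ≤ 126 := hall c3 (by simp)
      have h4 : c4.toNat ≤ 126 := hall c4 (by simp)
      have h5 : c5.toNat ≤ 126 := hall c5 (by simp)
      have h6 : c6.toNat ≤ 126 := hall c6 (by simp)
      have h7 : c7.toNat ≤ 126 := hall c7 (by simp)
      rw [show PySem.List.pyRange 0 7 1 = [0, 1, 2, 3, 4, 5, 6] from by decide]
      simp [List.foldl, aDigitStep, PySem.List.enumerate, bGo,
        PySem.List.pyGet?, PySem.List.pyIdx?, isIn_Xx,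
        ofChars_single c0 h0, ofChars_single c1 h1, ofChars_single c2 h2, ofChars_single c3 h3,
        ofChars_single c4 h4, ofChars_single c5 h5, ofChars_single c6 h6]
      by_cases hd0 : PySem.Chars.isdigit c0
      case neg => simp [hd0]
      case pos =>
      by_cases hd1 : PySem.Chars.isdigit c1
      case neg => simp [hd0, hd1]
      case pos =>
      by_cases hd2 : PySem.Chars.isdigit c2
      case neg => simp [hd0, hd1, hd2]
      case pos =>
      by_cases hd3 : PySem.Chars.isdigit c3
      case neg => simp [hd0, hd1, hd2, hd3]
      case pos =>
      by_cases hd4 : PySem.Chars.isdigit c4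
      case neg => simp [hd0, hd1, hd2, hd3, hd4]
      case pos =>
      by_cases hd5 : PySem.Chars.isdigit c5
      case neg => simp [hd0, hd1, hd2, hd3, hd4, hd5]
      case pos =>
      by_cases hd6 : PySem.Chars.isdigit c6
      case neg => simp [hd0, hd1, hd2, hd3, hd4, hd5, hd6]
      case pos =>
      simp only [hd0, hd1, hd2, hd3, hd4, hd5, hd6, if_true, Bool.true_and]
      by_cases hx : c7 = 'X' ∨ c7 = 'x'
      case pos =>
        rw [(upper_single_X c7 h7).2 hx]
        simp only [if_pos hx, if_true]
        exact final_X _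
      case neg =>
        have hu : ¬ (PySem.Chars.upper [c7] = ['X']) := fun h => hx ((upper_single_X c7 h7).1 h)
        rw [if_neg hu, if_neg hx, ofChars_single c7 h7]
        by_cases hd7 : PySem.Chars.isdigit c7
        case neg => simp [hd7]
        case pos =>
          simp only [hd7, if_true, Bool.true_and]
          rw [digit_char_upper c7 h7 hd7, ← digit_char_toChars c7 h7 hd7]
          have hb := isdigit_bounds c7 hd7
          exact final_digit _ _ (by omega) (by omega)
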